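-- pv_equiv track=rewrite | github.com/Excellcode/6.1010 | 6.1010_new/recipes/recipes/lab.py | compound_ingredient_possibilities
-- ===== SOURCE A (Python) =====
-- def compound_ingredient_possibilities(recipes_db):
--     """
--     Given a recipes database, a list containing compound and atomic food tuples,
--     make and return a dictionary that maps each compound food name to a
--     list of all the ingredient lists associated with that name.
--     """
--     result = {}
--     for recipe in recipes_db:
--         if recipe[0] == "compound":
--             # Initialize entry if not already present
--             if recipe[1] not in result:
--                 result[recipe[1]] = []
--             # Append ingredient list to compound name
--             result[recipe[1]].append(recipe[2])
--     return result
-- ===== SOURCE B (Python) =====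
-- def compound_ingredient_possibilities(recipes_db):
--     """Group compound recipe ingredient lists by name: filter once, dedup the
--     names in first-occurrence order, then build each group by a per-name scan."""
--     compounds = [r for r in recipes_db if r[0] == "compound"]
--     names = dict.fromkeys(r[1] for r in compounds)
--     return {name: [r[2] for r in compounds if r[1] == name] for name in names}
-- ===== Notes on version B (the rewrite author's own statement) =====
-- stated objective: alternative
-- what changed: Replaces A's single-pass mutable-dict accumulator (insert-if-absent then append) with a filter of the compound rows, an ordered dedup of their names, and a dict comprehension that rebuilds each group by a per-name scan of the filtered list.
import Mathlib
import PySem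

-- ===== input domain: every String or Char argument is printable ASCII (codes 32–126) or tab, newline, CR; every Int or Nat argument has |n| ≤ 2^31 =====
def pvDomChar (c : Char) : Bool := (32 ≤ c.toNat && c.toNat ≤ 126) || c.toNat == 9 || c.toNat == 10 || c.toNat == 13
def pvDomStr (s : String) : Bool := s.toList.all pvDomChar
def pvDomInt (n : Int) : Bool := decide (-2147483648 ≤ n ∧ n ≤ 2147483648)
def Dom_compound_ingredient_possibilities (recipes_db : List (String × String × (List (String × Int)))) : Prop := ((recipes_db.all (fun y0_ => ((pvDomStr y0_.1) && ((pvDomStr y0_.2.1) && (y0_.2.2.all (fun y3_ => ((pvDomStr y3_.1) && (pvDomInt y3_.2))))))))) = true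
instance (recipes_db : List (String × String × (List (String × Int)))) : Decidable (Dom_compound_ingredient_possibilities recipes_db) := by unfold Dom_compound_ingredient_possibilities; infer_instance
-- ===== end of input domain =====

-- B replaces A's one-pass mutable-dict accumulator by filter + ordered name dedup + a
-- per-name rebuild of each group (objective: alternative decomposition, not faster).

-- ===== PORT A =====
def compound_ingredient_possibilities (recipes_db : List (String × String × (List (String × Int)))) : List (String × List (List (String × Int))) :=
  (recipes_db.foldl (fun result recipe =>
      if recipe.1 == "compound" then
        -- Initialize entry if not already present
        let result' := if result.contains recipe.2.1 then result
                       else result.insert recipe.2.1 ([] : List (List (String × Int)))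
        -- Append ingredient list to compound name
        result'.modify recipe.2.1 [] (fun xs => xs ++ [recipe.2.2])
      else result)
    PySem.Dict.empty).items

-- ===== PORT B =====
def compound_ingredient_possibilities_alt (recipes_db : List (String × String × (List (String × Int)))) : List (String × List (List (String × Int))) :=
  let compounds := recipes_db.filter (fun r => r.1 == "compound")
  let names := PySem.Set.ofList (compounds.map (fun r => r.2.1))
  names.map (fun name => (name, (compounds.filter (fun r => r.2.1 == name)).map (fun r => r.2.2)))

-- ===== PRECONDITION & SPEC =====
def Spec_compound_ingredient_possibilities (recipes_db : List (String × String × (List (String × Int)))) (out : List (String × List (List (String × Int)))) : Prop := out = compound_ingredient_possibilities_alt recipes_db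
instance (recipes_db : List (String × String × (List (String × Int)))) (out : List (String × List (List (String × Int)))) : Decidable (Spec_compound_ingredient_possibilities recipes_db out) := by unfold Spec_compound_ingredient_possibilities; infer_instance

-- ===== CLAIM (what is proved, stated in full; the proofs are below) =====
def Claim_equal_compound_ingredient_possibilities : Prop := ∀ (recipes_db : List (String × String × (List (String × Int)))), Dom_compound_ingredient_possibilities recipes_db → Spec_compound_ingredient_possibilities recipes_db (compound_ingredient_possibilities recipes_db)

-- ===== LEMMAS AND PROOFS =====

-- A's "insert [] if absent, then append" step is one `modify`.
lemma step_eq_modify (d : PySem.Dict String (List (List (String × Int)))) (k : String)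
    (v : List (String × Int)) :
    (if d.contains k then d else d.insert k ([] : List (List (String × Int)))).modify k []
        (fun xs => xs ++ [v])
      = d.modify k [] (fun xs => xs ++ [v]) := by
  by_cases h : d.contains k
  · simp [h]
  · have h' : d.contains k = false := by simpa using h
    simp [h', PySem.Dict.modify, PySem.Dict.getD_insert_self, PySem.Dict.insert_insert_self,
      PySem.Dict.getD_of_not_contains d [] h']

lemma main_eq (recipes_db : List (String × String × (List (String × Int)))) :
    compound_ingredient_possibilities recipes_db
      = compound_ingredient_possibilities_alt recipes_db := by
  unfold compound_ingredient_possibilities compound_ingredient_possibilities_alt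
  have hfun : (fun (result : PySem.Dict String (List (List (String × Int))))
        (recipe : String × String × (List (String × Int))) =>
      if recipe.1 == "compound" then
        (if result.contains recipe.2.1 then result
         else result.insert recipe.2.1 ([] : List (List (String × Int)))).modify recipe.2.1 []
          (fun xs => xs ++ [recipe.2.2])
      else result)
      = (fun result recipe =>
      if recipe.1 == "compound" then
        result.modify recipe.2.1 [] (fun xs => xs ++ [recipe.2.2]) else result) := by
    funext d r
    by_cases h : r.1 == "compound" <;> simp [h, step_eq_modify]
  rw [hfun, ← List.foldl_filter]
  set cs := recipes_db.filter (fun r => r.1 == "compound") with hcs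
  have hmapfold : cs.foldl
        (fun (d : PySem.Dict String (List (List (String × Int)))) r =>
          d.modify r.2.1 [] (fun xs => xs ++ [r.2.2])) PySem.Dict.empty
      = (cs.map (fun r => (r.2.1, r.2.2))).foldl
          (fun d p => d.modify p.1 [] (fun xs => xs ++ [p.2])) PySem.Dict.empty := by
    rw [List.foldl_map]
  rw [hmapfold]
  set l := cs.map (fun r => (r.2.1, r.2.2)) with hl
  set D := l.foldl (fun (d : PySem.Dict String (List (List (String × Int)))) p =>
    d.modify p.1 [] (fun xs => xs ++ [p.2])) PySem.Dict.empty with hD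
  have hnodup : D.keys.Nodup := by
    rw [hD]
    exact PySem.Dict.nodup_keys_foldl_modify_key l Prod.fst []
      (fun d p => fun xs => xs ++ [p.2]) PySem.Dict.empty (by simp)
  have hkeys : D.keys = PySem.Set.ofList (cs.map (fun r => r.2.1)) := by
    rw [hD, PySem.Dict.keys_foldl_modify_key]
    simp [PySem.Set.update_nil_left, hl, List.map_map, Function.comp_def]
  rw [PySem.Dict.items_eq_map_keys D hnodup [], hkeys]
  apply List.map_congr_left
  intro k _
  have hget : D.getD k [] = (l.filter (fun p => p.1 == k)).map (fun p => p.2) := by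
    rw [hD, PySem.Dict.getD_foldl_modify_append]
    simp
  rw [hget, hl, List.filter_map, List.map_map]
  rfl

-- ===== VERDICT (by name: the statement is the Claim_ definition above) =====
theorem compound_ingredient_possibilities_spec : Claim_equal_compound_ingredient_possibilities := by
  intro db _
  unfold Spec_compound_ingredient_possibilities
  exact main_eq db
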